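-- pv_equiv track=rewrite | github.com/BryanCW0303/Leetcode | Binary Search/3710. Maximum Partition Factor.py | maxPartitionFactor
-- ===== SOURCE A (Python) =====
-- from typing import List
--
-- from itertools import combinations
--
-- def maxPartitionFactor(points: List[List[int]]) -> int:
--     n = len(points)
--     if n == 2:
--         return 0
--
--     def check(low):
--         colors = [0] * n
--
--         def dfs(i, c):
--             colors[i] = c
--             x1, y1 = points[i]
--             for j, (x2, y2) in enumerate(points):
--                 if i == j or abs(x1 - x2) + abs(y1 - y2) >= low:
--                     continue
--                 if colors[j] == c or (colors[j] == 0 and not dfs(j, -c)):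
--                     return False
--             return True
--
--         for i, c in enumerate(colors):
--             if colors[i] == 0 and not dfs(i, 1):
--                 return False
--         return True
--
--     mx = max(abs(x1 - x2) + abs(y1 - y2) for (x1, y1), (x2, y2) in combinations(points, 2))
--     left, right = 0, mx
--     while left <= right:
--         mid = (left + right) // 2
--         if check(mid):
--             left = mid + 1
--         else:
--             right = mid - 1
--     return right
-- ===== SOURCE B (Python) =====
-- from typing import List
--
--
-- def maxPartitionFactor(points: List[List[int]]) -> int:
--     n = len(points)
--     if n == 2:
--         return 0
--
--     pairs = []
--     for i in range(n):
--         xi, yi = points[i]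
--         for j in range(i + 1, n):
--             xj, yj = points[j]
--             pairs.append((abs(xi - xj) + abs(yi - yj), i, j))
--
--     mx = max(d for d, _, _ in pairs)
--
--     def ok(low):
--         # parity union-find by component relabeling: comp[k] = component id,
--         # par[k] = colour relative to the component's representative
--         comp = list(range(n))
--         par = [False] * n
--         for d, i, j in pairs:
--             if d >= low:
--                 continue
--             if comp[i] == comp[j]:
--                 if par[i] == par[j]:
--                     return False
--             else:
--                 ci, cj = comp[i], comp[j]
--                 flip = par[i] == par[j]
--                 for k in range(n):
--                     if comp[k] == cj:
--                         comp[k] = ci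
--                         if flip:
--                             par[k] = not par[k]
--         return True
--
--     left, right = 0, mx
--     while left <= right:
--         mid = (left + right) // 2
--         if ok(mid):
--             left = mid + 1
--         else:
--             right = mid - 1
--     return right
-- ===== Notes on version B (the rewrite author's own statement) =====
-- stated objective: alternative
-- what changed: The recursive greedy DFS 2-coloring inside check is replaced by a parity union-find (component ids plus relative colours, merged by whole-component relabeling) driven by a precomputed list of index pairs; the outer binary search and the n==2 guard are kept.
import Mathlib
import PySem

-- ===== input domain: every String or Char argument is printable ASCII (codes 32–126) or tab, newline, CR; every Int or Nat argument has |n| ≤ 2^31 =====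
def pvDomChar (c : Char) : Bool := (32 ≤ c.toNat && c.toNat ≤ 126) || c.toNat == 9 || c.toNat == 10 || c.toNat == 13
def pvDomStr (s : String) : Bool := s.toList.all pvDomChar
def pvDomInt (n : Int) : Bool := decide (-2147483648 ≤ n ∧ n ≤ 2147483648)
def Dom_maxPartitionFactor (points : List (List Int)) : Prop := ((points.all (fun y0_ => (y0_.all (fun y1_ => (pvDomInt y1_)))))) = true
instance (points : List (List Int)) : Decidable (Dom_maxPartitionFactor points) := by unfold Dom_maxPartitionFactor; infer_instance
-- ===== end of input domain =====

-- B replaces A's recursive greedy DFS 2-coloring by a parity union-find (component ids + relative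
-- colours, merged by whole-component relabeling) over a precomputed pair list; same binary search.
-- Return-value equivalence only; neither program mutates its argument.

-- ===== PORT A =====
-- Manhattan distance |x1-x2|+|y1-y2| between two rows; row access p[0], p[1] is exact for rows of
-- length 2 (guaranteed by Pre_ whenever the rows are actually read).
def manDist (p q : List Int) : Int := |p.getD 0 0 - q.getD 0 0| + |p.getD 1 0 - q.getD 1 0|

-- loop body of dfs: `for j, (x2, y2) in enumerate(points)` (iterated as j over range(n))
def stepA (pts : List (List Int)) (low : Int) (dfs : List Int → Nat → Int → List Int × Bool)
    (i : Nat) (c : Int) (st : List Int × Bool) (j : Nat) : List Int × Bool :=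
  if st.2 = false then st
  else if i = j ∨ low ≤ manDist (pts.getD i []) (pts.getD j []) then st
  else if st.1.getD j 0 = c then (st.1, false)
  else if st.1.getD j 0 = 0 then dfs st.1 j (-c)
  else st

-- recursive dfs(i, c); the fuel (pts.length + 1 at the call site) bounds the nesting depth:
-- every nested call colours a previously-uncoloured node first.
def dfsA (pts : List (List Int)) (low : Int) : Nat → List Int → Nat → Int → List Int × Bool
  | 0, cl, _, _ => (cl, false)
  | fuel + 1, cl, i, c =>
    (List.range pts.length).foldl
      (stepA pts low (fun cl' j' c' => dfsA pts low fuel cl' j' c') i c) (cl.set i c, true)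

-- loop body of `for i, c in enumerate(colors): if colors[i] == 0 and not dfs(i, 1): return False`
def topStepA (pts : List (List Int)) (low : Int) (st : List Int × Bool) (i : Nat) : List Int × Bool :=
  if st.2 = false then st
  else if st.1.getD i 0 = 0 then dfsA pts low (pts.length + 1) st.1 i 1
  else st

def checkA (pts : List (List Int)) (low : Int) : Bool :=
  ((List.range pts.length).foldl (topStepA pts low) (List.replicate pts.length 0, true)).2

-- max(... for ... in combinations(points, 2)): element pairs in index order i < j
def distsA (pts : List (List Int)) : List Int :=
  (List.range pts.length).flatMap (fun i =>
    (List.range' (i + 1) (pts.length - (i + 1))).map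
      (fun j => manDist (pts.getD i []) (pts.getD j [])))

-- the while left <= right loop; fuel (mx+2).toNat bounds the iteration count (the interval shrinks)
def bsA (check : Int → Bool) : Nat → Int → Int → Int
  | 0, _, r => r
  | fuel + 1, l, r =>
    if l ≤ r then
      if check (PySem.Int.floordiv (l + r) 2) then bsA check fuel (PySem.Int.floordiv (l + r) 2 + 1) r
      else bsA check fuel l (PySem.Int.floordiv (l + r) 2 - 1)
    else r

def maxPartitionFactor (points : List (List Int)) : Int :=
  if points.length = 2 then 0
  else
    -- max() raises on fewer than 2 points: excluded by Pre_
    let mx := (PySem.List.max? (distsA points) (fun x => x)).getD 0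
    bsA (checkA points) (mx + 2).toNat 0 mx

-- ===== PORT B =====
-- pairs: (distance, i, j) for all i < j, built by the double loop
def pairsB (pts : List (List Int)) : List (Int × Nat × Nat) :=
  (List.range pts.length).flatMap (fun i =>
    (List.range' (i + 1) (pts.length - (i + 1))).map
      (fun j => (manDist (pts.getD i []) (pts.getD j []), i, j)))

-- one step of ok(low): parity union-find; merging relabels the whole component of j
def stepB (low : Int) (st : (List Nat × List Bool) × Bool) (e : Int × Nat × Nat) :
    (List Nat × List Bool) × Bool :=
  if st.2 = false then st
  else if low ≤ e.1 then st
  else if st.1.1.getD e.2.1 0 = st.1.1.getD e.2.2 0 then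
    if st.1.2.getD e.2.1 false = st.1.2.getD e.2.2 false then (st.1, false) else st
  else
    let ci := st.1.1.getD e.2.1 0
    let cj := st.1.1.getD e.2.2 0
    let flip := st.1.2.getD e.2.1 false == st.1.2.getD e.2.2 false
    ((st.1.1.map fun x => if x = cj then ci else x,
      (st.1.1.zip st.1.2).map fun cp => if cp.1 = cj ∧ flip = true then !cp.2 else cp.2), true)

def checkB (n : Nat) (pairs : List (Int × Nat × Nat)) (low : Int) : Bool :=
  (pairs.foldl (stepB low) ((List.range n, List.replicate n false), true)).2

def bsB (check : Int → Bool) : Nat → Int → Int → Int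
  | 0, _, r => r
  | fuel + 1, l, r =>
    if l ≤ r then
      if check (PySem.Int.floordiv (l + r) 2) then bsB check fuel (PySem.Int.floordiv (l + r) 2 + 1) r
      else bsB check fuel l (PySem.Int.floordiv (l + r) 2 - 1)
    else r

def maxPartitionFactor_alt (points : List (List Int)) : Int :=
  if points.length = 2 then 0
  else
    let pairs := pairsB points
    let mx := (PySem.List.max? (pairs.map (·.1)) (fun x => x)).getD 0
    bsB (checkB points.length pairs) (mx + 2).toNat 0 mx

-- ===== PRECONDITION & SPEC =====
-- Pre_ excludes exactly the inputs where the Python raises: fewer than 2 points (max() over an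
-- empty sequence, ValueError) and, for 3 or more points, any row that does not unpack as a pair.
def Pre_maxPartitionFactor (points : List (List Int)) : Prop :=
  points.length = 2 ∨ (3 ≤ points.length ∧ ∀ p ∈ points, p.length = 2)
instance (points : List (List Int)) : Decidable (Pre_maxPartitionFactor points) := by
  unfold Pre_maxPartitionFactor; infer_instance

def pvWitness_maxPartitionFactor : List (List Int) := [[0, 0], [1, 0], [0, 1]]

def Spec_maxPartitionFactor (points : List (List Int)) (out : Int) : Prop := out = maxPartitionFactor_alt points
instance (points : List (List Int)) (out : Int) : Decidable (Spec_maxPartitionFactor points out) := by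
  unfold Spec_maxPartitionFactor; infer_instance

-- ===== CLAIM (what is proved, stated in full; the proofs are below) =====
def Claim_equal_maxPartitionFactor : Prop := ∀ (points : List (List Int)), Dom_maxPartitionFactor points → Pre_maxPartitionFactor points → Spec_maxPartitionFactor points (maxPartitionFactor points)

-- ===== LEMMAS AND PROOFS =====

def edgeP (pts : List (List Int)) (low : Int) (i j : Nat) : Prop :=
  i ≠ j ∧ manDist (pts.getD i []) (pts.getD j []) < low

def ProperC (pts : List (List Int)) (low : Int) (c : Nat → Bool) : Prop :=
  ∀ i j, i < pts.length → j < pts.length → edgeP pts low i j → c i ≠ c j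

def encB (b : Bool) : Int := if b then 1 else -1

def ValOK (cl : List Int) : Prop := ∀ k, cl.getD k 0 = -1 ∨ cl.getD k 0 = 0 ∨ cl.getD k 0 = 1

def NbOK (pts : List (List Int)) (low : Int) (cl : List Int) (k : Nat) : Prop :=
  ∀ j, j < pts.length → edgeP pts low k j → cl.getD j 0 = -(cl.getD k 0)

def PropClr (pts : List (List Int)) (low : Int) (cl : List Int) : Prop :=
  ∀ k, k < pts.length → cl.getD k 0 ≠ 0 → NbOK pts low cl k

def count0 (cl : List Int) : Nat := (List.range cl.length).countP (fun k => cl.getD k 0 == 0)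

def GoodB (pts : List (List Int)) (c : Nat → Bool) (comp : List Nat) (par : List Bool) : Prop :=
  ∀ a b, a < pts.length → b < pts.length → comp.getD a 0 = comp.getD b 0 →
    (par.getD a false = par.getD b false ↔ c a = c b)
lemma set_getD (cl : List Int) (i k : Nat) (c : Int) :
    (cl.set i c).getD k 0 = if i = k ∧ i < cl.length then c else cl.getD k 0 := by
  by_cases hk : k < cl.length
  · have hk' : k < (cl.set i c).length := by simpa using hk
    rw [List.getD_eq_getElem _ _ hk', List.getD_eq_getElem _ _ hk, List.getElem_set]
    by_cases hik : i = k
    · subst hik; simp [hk]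
    · simp [hik]
  · have hk2 : cl.length ≤ k := le_of_not_gt hk
    rw [List.getD_eq_default _ _ (by simpa using hk2), List.getD_eq_default _ _ hk2]
    have h : ¬(i = k ∧ i < cl.length) := by rintro ⟨rfl, h⟩; omega
    simp [h]

lemma replicate_getD (n k : Nat) : (List.replicate n (0 : Int)).getD k 0 = 0 := by
  by_cases hk : k < n
  · rw [List.getD_eq_getElem _ _ (by simpa using hk)]; simp
  · rw [List.getD_eq_default _ _ (by simpa using hk)]

lemma range_getD (n k : Nat) (hk : k < n) : (List.range n).getD k 0 = k := by
  rw [List.getD_eq_getElem _ _ (by simpa using hk)]; simp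

lemma countP_lt_of {α : Type} (p q : α → Bool) :
    ∀ (l : List α), (∀ a ∈ l, q a = true → p a = true) →
      ∀ a0 ∈ l, p a0 = true → q a0 = false → l.countP q < l.countP p := by
  intro l
  induction l with
  | nil => intro _ a0 h; cases h
  | cons x l ih =>
    intro himp a0 hmem hp hq
    simp only [List.countP_cons]
    rcases List.mem_cons.mp hmem with rfl | hmem'
    · have hle : l.countP q ≤ l.countP p :=
        List.countP_mono_left (fun a ha hqa => himp a (List.mem_cons_of_mem _ ha) hqa)
      simp [hp, hq]; omega
    · have hlt := ih (fun a ha => himp a (List.mem_cons_of_mem _ ha)) a0 hmem' hp hq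
      have hx : (if q x = true then 1 else 0) ≤ (if p x = true then 1 else 0) := by
        by_cases h : q x = true
        · simp [h, himp x List.mem_cons_self h]
        · simp [h]
      omega

lemma count0_le (cl : List Int) : count0 cl ≤ cl.length := by
  unfold count0
  simpa using List.countP_le_length (p := fun k => cl.getD k 0 == 0) (l := List.range cl.length)

lemma count0_pos (cl : List Int) (i : Nat) (hi : i < cl.length) (h : cl.getD i 0 = 0) :
    1 ≤ count0 cl := by
  unfold count0
  have hm : i ∈ List.range cl.length := List.mem_range.mpr hi
  exact (List.countP_pos_iff).mpr ⟨i, hm, by rw [h]; rfl⟩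

lemma count0_set_lt (cl : List Int) (i : Nat) (c : Int) (hi : i < cl.length)
    (h : cl.getD i 0 = 0) (hc : c ≠ 0) : count0 (cl.set i c) < count0 cl := by
  unfold count0
  rw [List.length_set]
  apply countP_lt_of _ _ (List.range cl.length) ?imp i (List.mem_range.mpr hi) (by rw [h]; rfl)
    (by rw [set_getD, if_pos ⟨rfl, hi⟩]; simpa using hc)
  case imp =>
    intro a _ hqa
    rw [set_getD] at hqa
    by_cases hcase : i = a ∧ i < cl.length
    · rw [if_pos hcase] at hqa; exact absurd (by simpa using hqa) hc
    · rw [if_neg hcase] at hqa; exact hqa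

lemma count0_mono_ext (cl cl' : List Int) (hlen : cl'.length = cl.length)
    (hext : ∀ k, cl.getD k 0 ≠ 0 → cl'.getD k 0 = cl.getD k 0) : count0 cl' ≤ count0 cl := by
  unfold count0
  rw [hlen]
  apply List.countP_mono_left
  intro a _ hq
  by_cases h0 : cl.getD a 0 = 0
  · rw [h0]; rfl
  · rw [hext a h0] at hq; exact hq

lemma NbOK_ext (pts : List (List Int)) (low : Int) (cl cl' : List Int) (k : Nat)
    (h : NbOK pts low cl k) (hk : cl.getD k 0 = 1 ∨ cl.getD k 0 = -1)
    (hext : ∀ m, cl.getD m 0 ≠ 0 → cl'.getD m 0 = cl.getD m 0) : NbOK pts low cl' k := by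
  intro j hj he
  have hkk : cl.getD k 0 ≠ 0 := by rcases hk with h' | h' <;> (rw [h']; omega)
  have hj0 : cl.getD j 0 ≠ 0 := by
    rw [h j hj he]; rcases hk with h' | h' <;> (rw [h']; omega)
  rw [hext j hj0, hext k hkk, h j hj he]

lemma manDist_comm (p q : List Int) : manDist p q = manDist q p := by
  simp [manDist, abs_sub_comm]

lemma getD_merge_comp (comp : List Nat) (ci cj k : Nat) (hk : k < comp.length) :
    ((comp.map fun x => if x = cj then ci else x).getD k 0) =
      if comp.getD k 0 = cj then ci else comp.getD k 0 := by
  have hk' : k < (comp.map fun x => if x = cj then ci else x).length := by simpa using hk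
  rw [List.getD_eq_getElem _ _ hk', List.getElem_map, List.getD_eq_getElem _ _ hk]

lemma getD_merge_par (comp : List Nat) (par : List Bool) (cj : Nat) (flip : Bool) (k : Nat)
    (hk : k < comp.length) (hl : par.length = comp.length) :
    (((comp.zip par).map fun cp => if cp.1 = cj ∧ flip = true then !cp.2 else cp.2).getD k false) =
      if comp.getD k 0 = cj ∧ flip = true then !(par.getD k false) else par.getD k false := by
  have hkz : k < ((comp.zip par).map fun cp => if cp.1 = cj ∧ flip = true then !cp.2 else cp.2).length := by
    simp [List.length_zip, hl, hk]
  rw [List.getD_eq_getElem _ _ hkz, List.getElem_map, List.getElem_zip,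
    List.getD_eq_getElem _ _ hk, List.getD_eq_getElem _ _ (by omega : k < par.length)]

lemma mem_pairsB (pts : List (List Int)) (e : Int × Nat × Nat) :
    e ∈ pairsB pts ↔ ∃ i j, e = (manDist (pts.getD i []) (pts.getD j []), i, j) ∧
      i < j ∧ j < pts.length := by
  simp only [pairsB, List.mem_flatMap, List.mem_map, List.mem_range, List.mem_range'_1]
  constructor
  · rintro ⟨i, hi, j, hj, rfl⟩
    exact ⟨i, j, rfl, by omega, by omega⟩
  · rintro ⟨i, j, rfl, hij, hjn⟩
    exact ⟨i, by omega, j, ⟨by omega, by omega⟩, rfl⟩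

lemma dists_eq (pts : List (List Int)) : distsA pts = (pairsB pts).map (·.1) := by
  simp [distsA, pairsB, List.map_flatMap, List.map_map, Function.comp_def]

lemma foldl_flag_false {σ α : Type} (f : (σ × Bool) → α → σ × Bool)
    (hf : ∀ st a, st.2 = false → f st a = st) :
    ∀ (l : List α) (st : σ × Bool), st.2 = false → l.foldl f st = st := by
  intro l
  induction l with
  | nil => intro st _; rfl
  | cons a l ih => intro st h; simp only [List.foldl_cons, hf st a h]; exact ih st h

lemma bool_not_iff : ∀ x y : Bool, ((!x) = (!y)) ↔ (x = y) := by decide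

lemma boolMagicT : ∀ pa pb pi pj ca cb ci cj : Bool,
    ((pa = pj) ↔ (ca = cj)) → ((pb = pi) ↔ (cb = ci)) → (¬ ci = cj) →
    ((pi == pj) = true → (((!pa) = pb) ↔ (ca = cb))) := by
  intro pa pb pi pj ca cb ci cj h1 h2 h3 h4
  revert h1 h2 h3 h4
  cases pa <;> cases pb <;> cases pi <;> cases pj <;> cases ca <;> cases cb <;>
    cases ci <;> cases cj <;> decide

lemma boolMagicF : ∀ pa pb pi pj ca cb ci cj : Bool,
    ((pa = pj) ↔ (ca = cj)) → ((pb = pi) ↔ (cb = ci)) → (¬ ci = cj) →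
    (¬ (pi == pj) = true → ((pa = pb) ↔ (ca = cb))) := by decide

lemma boolMagic2T : ∀ pa pb pi pj ca cb ci cj : Bool,
    ((pb = pj) ↔ (cb = cj)) → ((pa = pi) ↔ (ca = ci)) → (¬ ci = cj) →
    ((pi == pj) = true → ((pa = (!pb)) ↔ (ca = cb))) := by
  intro pa pb pi pj ca cb ci cj h1 h2 h3 h4
  revert h1 h2 h3 h4
  cases pa <;> cases pb <;> cases pi <;> cases pj <;> cases ca <;> cases cb <;>
    cases ci <;> cases cj <;> decide

lemma boolMagic2F : ∀ pa pb pi pj ca cb ci cj : Bool,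
    ((pb = pj) ↔ (cb = cj)) → ((pa = pi) ↔ (ca = ci)) → (¬ ci = cj) →
    (¬ (pi == pj) = true → ((pa = pb) ↔ (ca = cb))) := by decide

lemma dfsA_sound (pts : List (List Int)) (low : Int) :
    ∀ (fuel : Nat) (cl : List Int) (i : Nat) (c : Int) (cl' : List Int),
      cl.length = pts.length → i < pts.length → (c = 1 ∨ c = -1) → ValOK cl →
      dfsA pts low fuel cl i c = (cl', true) →
      cl'.length = pts.length ∧
      (∀ k, k ≠ i → cl.getD k 0 ≠ 0 → cl'.getD k 0 = cl.getD k 0) ∧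
      cl'.getD i 0 = c ∧ ValOK cl' ∧
      (∀ k, k < pts.length → cl'.getD k 0 ≠ (cl.set i c).getD k 0 → NbOK pts low cl' k) ∧
      NbOK pts low cl' i := by
  intro fuel
  induction fuel with
  | zero =>
    intro cl i c cl' _ _ _ _ h
    exact absurd (congrArg Prod.snd h) (by simp [dfsA])
  | succ fuel ih =>
    intro cl i c cl' hlen hi hc hval hrun
    have hc0 : c ≠ 0 := by rcases hc with rfl | rfl <;> omega
    have hflag : ∀ (st : List Int × Bool) (a : Nat), st.2 = false →
        stepA pts low (fun a b d => dfsA pts low fuel a b d) i c st a = st := by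
      intro st a hst; simp [stepA, hst]
    have go : ∀ (js : List Nat) (cl0 cl1 : List Int),
        (∀ j ∈ js, j < pts.length) → cl0.length = pts.length →
        cl0.getD i 0 = c → ValOK cl0 →
        js.foldl (stepA pts low (fun a b d => dfsA pts low fuel a b d) i c) (cl0, true) = (cl1, true) →
        cl1.length = pts.length ∧
        (∀ k, cl0.getD k 0 ≠ 0 → cl1.getD k 0 = cl0.getD k 0) ∧ ValOK cl1 ∧
        (∀ k, k < pts.length → cl1.getD k 0 ≠ cl0.getD k 0 → NbOK pts low cl1 k) ∧
        (∀ j ∈ js, edgeP pts low i j → cl1.getD j 0 = -c) := by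
      intro js
      induction js with
      | nil =>
        intro cl0 cl1 _ hl0 _ hv0 hrun
        obtain rfl : cl0 = cl1 := by simpa using hrun
        exact ⟨hl0, fun _ _ => rfl, hv0, fun k _ hne => absurd rfl hne,
          fun j hj => absurd hj (List.not_mem_nil)⟩
      | cons j js ihjs =>
        intro cl0 cl1 hmem hl0 hci hv0 hrun
        simp only [List.foldl_cons] at hrun
        have hjn : j < pts.length := hmem j List.mem_cons_self
        have hmem' : ∀ x ∈ js, x < pts.length := fun x hx => hmem x (List.mem_cons_of_mem _ hx)
        by_cases hskip : i = j ∨ low ≤ manDist (pts.getD i []) (pts.getD j [])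
        · have hstep : stepA pts low (fun a b d => dfsA pts low fuel a b d) i c (cl0, true) j
              = (cl0, true) := by simp only [stepA]; rw [if_neg (by simp), if_pos hskip]
          rw [hstep] at hrun
          obtain ⟨a1, a2, a3, a4, a5⟩ := ihjs cl0 cl1 hmem' hl0 hci hv0 hrun
          refine ⟨a1, a2, a3, a4, ?_⟩
          intro j' hj' he
          rcases List.mem_cons.mp hj' with rfl | hj''
          · rcases hskip with h | h
            · exact absurd h he.1
            · exact absurd he.2 (not_lt.mpr h)
          · exact a5 j' hj'' he
        · by_cases hcj : cl0.getD j 0 = c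
          · have hstep : stepA pts low (fun a b d => dfsA pts low fuel a b d) i c (cl0, true) j
                = (cl0, false) := by simp only [stepA]; rw [if_neg (by simp), if_neg hskip, if_pos hcj]
            rw [hstep, foldl_flag_false _ hflag js _ rfl] at hrun
            simp at hrun
          · by_cases h0 : cl0.getD j 0 = 0
            · have hstep : stepA pts low (fun a b d => dfsA pts low fuel a b d) i c (cl0, true) j
                  = dfsA pts low fuel cl0 j (-c) := by simp only [stepA]; rw [if_neg (by simp), if_neg hskip, if_neg hcj, if_pos h0]
              rw [hstep] at hrun
              rcases hd : dfsA pts low fuel cl0 j (-c) with ⟨cl2, b2⟩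
              rw [hd] at hrun
              cases b2 with
              | false =>
                rw [foldl_flag_false _ hflag js _ rfl] at hrun
                simp at hrun
              | true =>
                have hcneg : -c = 1 ∨ -c = -1 := by rcases hc with rfl | rfl <;> simp
                obtain ⟨b1, b2e, b3, b4, b5, b6⟩ := ih cl0 j (-c) cl2 hl0 hjn hcneg hv0 hd
                have hij : i ≠ j := fun h => hskip (Or.inl h)
                have hcine : cl0.getD i 0 ≠ 0 := by rw [hci]; exact hc0
                have hcl2i : cl2.getD i 0 = c := by rw [b2e i hij hcine, hci]
                obtain ⟨a1, a2, a3, a4, a5⟩ := ihjs cl2 cl1 hmem' b1 hcl2i b4 hrun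
                have hext02 : ∀ k, cl0.getD k 0 ≠ 0 → cl2.getD k 0 = cl0.getD k 0 := by
                  intro k hk
                  have hkj : k ≠ j := fun h => hk (h ▸ h0)
                  exact b2e k hkj hk
                have hnegne : (-c : Int) ≠ 0 := by rcases hc with rfl | rfl <;> omega
                refine ⟨a1, ?_, a3, ?_, ?_⟩
                · intro k hk
                  rw [a2 k (by rw [hext02 k hk]; exact hk), hext02 k hk]
                · intro k hk hne
                  by_cases hch2 : cl1.getD k 0 = cl2.getD k 0
                  · rw [hch2] at hne
                    by_cases hkj : k = j
                    · subst hkj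
                      refine NbOK_ext pts low cl2 cl1 k b6 (by rw [b3]; exact hcneg) a2
                    · have hset : (cl0.set j (-c)).getD k 0 = cl0.getD k 0 := by
                        rw [set_getD, if_neg (by rintro ⟨rfl, -⟩; exact hkj rfl)]
                      have hnb2 : NbOK pts low cl2 k := b5 k hk (by rw [hset]; exact hne)
                      have hc0k : cl0.getD k 0 = 0 := by
                        by_contra hxx
                        exact hne (hext02 k hxx)
                      have hcl2k : cl2.getD k 0 = 1 ∨ cl2.getD k 0 = -1 := by
                        rcases b4 k with h | h | h
                        · right; exact h
                        · exact absurd (h.trans hc0k.symm) hne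
                        · left; exact h
                      exact NbOK_ext pts low cl2 cl1 k hnb2 hcl2k a2
                  · exact a4 k hk hch2
                · intro j' hj' he
                  rcases List.mem_cons.mp hj' with rfl | hj''
                  · rw [a2 j' (by rw [b3]; exact hnegne), b3]
                  · exact a5 j' hj'' he
            · have hstep : stepA pts low (fun a b d => dfsA pts low fuel a b d) i c (cl0, true) j
                  = (cl0, true) := by simp only [stepA]; rw [if_neg (by simp), if_neg hskip, if_neg hcj, if_neg h0]
              rw [hstep] at hrun
              obtain ⟨a1, a2, a3, a4, a5⟩ := ihjs cl0 cl1 hmem' hl0 hci hv0 hrun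
              refine ⟨a1, a2, a3, a4, ?_⟩
              intro j' hj' he
              rcases List.mem_cons.mp hj' with rfl | hj''
              · have hval' : cl0.getD j' 0 = -c := by
                  rcases hv0 j' with h | h | h
                  · rcases hc with rfl | rfl
                    · rw [h]
                    · exact absurd h hcj
                  · exact absurd h h0
                  · rcases hc with rfl | rfl
                    · exact absurd h hcj
                    · rw [h]; norm_num
                rw [a2 j' h0, hval']
              · exact a5 j' hj'' he
    simp only [dfsA] at hrun
    have hilen : i < cl.length := by omega
    have hset_len : (cl.set i c).length = pts.length := by simpa using hlen
    have hset_i : (cl.set i c).getD i 0 = c := by rw [set_getD, if_pos ⟨rfl, hilen⟩]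
    have hset_val : ValOK (cl.set i c) := by
      intro k
      rw [set_getD]
      by_cases hcase : i = k ∧ i < cl.length
      · rw [if_pos hcase]; rcases hc with rfl | rfl
        · right; right; rfl
        · left; rfl
      · rw [if_neg hcase]; exact hval k
    obtain ⟨a1, a2, a3, a4, a5⟩ := go (List.range pts.length) (cl.set i c) cl'
      (fun x hx => List.mem_range.mp hx) hset_len hset_i hset_val hrun
    have hcl'i : cl'.getD i 0 = c := by rw [a2 i (by rw [hset_i]; exact hc0), hset_i]
    refine ⟨a1, ?_, hcl'i, a3, a4, ?_⟩
    · intro k hk hk0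
      have hset : (cl.set i c).getD k 0 = cl.getD k 0 := by
        rw [set_getD, if_neg (by rintro ⟨rfl, -⟩; exact hk rfl)]
      rw [a2 k (by rw [hset]; exact hk0), hset]
    · intro j hj he
      rw [a5 j (List.mem_range.mpr hj) he, hcl'i]

lemma encB_ne_zero : ∀ b : Bool, encB b ≠ 0 := by decide

lemma encB_inj : ∀ b1 b2 : Bool, encB b1 = encB b2 → b1 = b2 := by decide

lemma encB_neg (b1 b2 : Bool) (h : b1 ≠ b2) : -(encB b1) = encB b2 := by
  cases b1 <;> cases b2 <;> simp_all [encB]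

lemma dfsA_complete (pts : List (List Int)) (low : Int) (c : Nat → Bool)
    (hC : ProperC pts low c) :
    ∀ (fuel : Nat) (cl : List Int) (i : Nat),
      cl.length = pts.length → i < pts.length → cl.getD i 0 = 0 →
      (∀ k, cl.getD k 0 ≠ 0 → cl.getD k 0 = encB (c k)) →
      count0 cl ≤ fuel →
      ∃ cl', dfsA pts low fuel cl i (encB (c i)) = (cl', true) ∧
        cl'.length = pts.length ∧
        (∀ k, cl.getD k 0 ≠ 0 → cl'.getD k 0 = cl.getD k 0) ∧
        (∀ k, cl'.getD k 0 ≠ 0 → cl'.getD k 0 = encB (c k)) ∧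
        cl'.getD i 0 = encB (c i) := by
  intro fuel
  induction fuel with
  | zero =>
    intro cl i hlen hi h0 _ hcnt
    exact absurd hcnt (by have := count0_pos cl i (by omega) h0; omega)
  | succ fuel ih =>
    intro cl i hlen hi h0 hagree hcnt
    have hilen : i < cl.length := by omega
    set cl0 := cl.set i (encB (c i)) with hcl0def
    have hl0 : cl0.length = pts.length := by rw [hcl0def, List.length_set]; exact hlen
    have h0i : cl0.getD i 0 = encB (c i) := by rw [hcl0def, set_getD, if_pos ⟨rfl, hilen⟩]
    have hag0 : ∀ k, cl0.getD k 0 ≠ 0 → cl0.getD k 0 = encB (c k) := by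
      intro k hk
      rw [hcl0def, set_getD] at hk ⊢
      by_cases hcase : i = k ∧ i < cl.length
      · obtain ⟨heq, hlt⟩ := hcase
        rw [if_pos ⟨heq, hlt⟩, heq]
      · rw [if_neg hcase] at hk ⊢
        exact hagree k hk
    have hcnt0 : count0 cl0 ≤ fuel := by
      have := count0_set_lt cl i (encB (c i)) hilen h0 (encB_ne_zero _)
      rw [hcl0def]
      omega
    have go : ∀ (js : List Nat) (cla : List Int),
        (∀ j ∈ js, j < pts.length) → cla.length = pts.length →
        cla.getD i 0 = encB (c i) →
        (∀ k, cla.getD k 0 ≠ 0 → cla.getD k 0 = encB (c k)) →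
        count0 cla ≤ fuel →
        ∃ cl1, js.foldl (stepA pts low (fun a b d => dfsA pts low fuel a b d) i (encB (c i)))
            (cla, true) = (cl1, true) ∧
          cl1.length = pts.length ∧
          (∀ k, cla.getD k 0 ≠ 0 → cl1.getD k 0 = cla.getD k 0) ∧
          (∀ k, cl1.getD k 0 ≠ 0 → cl1.getD k 0 = encB (c k)) ∧
          count0 cl1 ≤ fuel := by
      intro js
      induction js with
      | nil =>
        intro cla _ hla hai hag hcn
        exact ⟨cla, rfl, hla, fun _ _ => rfl, hag, hcn⟩
      | cons j js ihjs =>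
        intro cla hmem hla hai hag hcn
        have hjn : j < pts.length := hmem j List.mem_cons_self
        have hmem' : ∀ x ∈ js, x < pts.length := fun x hx => hmem x (List.mem_cons_of_mem _ hx)
        simp only [List.foldl_cons]
        by_cases hskip : i = j ∨ low ≤ manDist (pts.getD i []) (pts.getD j [])
        · rw [show stepA pts low (fun a b d => dfsA pts low fuel a b d) i (encB (c i)) (cla, true) j
              = (cla, true) from by simp only [stepA]; rw [if_neg (by simp), if_pos hskip]]
          exact ihjs cla hmem' hla hai hag hcn
        · have hedge : edgeP pts low i j :=
            ⟨fun h => hskip (Or.inl h), not_le.mp (fun h => hskip (Or.inr h))⟩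
          have hcij : c i ≠ c j := hC i j hi hjn hedge
          have hne : ¬ cla.getD j 0 = encB (c i) := by
            intro h
            have hnz : cla.getD j 0 ≠ 0 := by rw [h]; exact encB_ne_zero _
            have hjv := hag j hnz
            rw [h] at hjv
            exact hcij (encB_inj _ _ hjv)
          rw [show stepA pts low (fun a b d => dfsA pts low fuel a b d) i (encB (c i)) (cla, true) j
              = if cla.getD j 0 = 0 then dfsA pts low fuel cla j (-(encB (c i))) else (cla, true)
              from by simp only [stepA]; rw [if_neg (by simp), if_neg hskip, if_neg hne]]
          by_cases h0j : cla.getD j 0 = 0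
          · rw [if_pos h0j, encB_neg _ _ hcij]
            obtain ⟨cl2, hd, hb1, hb2, hb3, hb4⟩ := ih cla j hla hjn h0j hag hcn
            rw [hd]
            have hai2 : cl2.getD i 0 = encB (c i) := by
              rw [hb2 i (by rw [hai]; exact encB_ne_zero _), hai]
            have hcnt2 : count0 cl2 ≤ fuel :=
              le_trans (count0_mono_ext cla cl2 (by omega) hb2) hcn
            obtain ⟨cl1, hrun1, hx1, hx2, hx3, hx4⟩ := ihjs cl2 hmem' hb1 hai2 hb3 hcnt2
            refine ⟨cl1, hrun1, hx1, ?_, hx3, hx4⟩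
            intro k hk
            rw [hx2 k (by rw [hb2 k hk]; exact hk), hb2 k hk]
          · rw [if_neg h0j]
            exact ihjs cla hmem' hla hai hag hcn
    simp only [dfsA]
    obtain ⟨cl1, hrun, hx1, hx2, hx3, hx4⟩ := go (List.range pts.length) cl0
      (fun x hx => List.mem_range.mp hx) hl0 h0i hag0 hcnt0
    refine ⟨cl1, hrun, hx1, ?_, hx3, ?_⟩
    · intro k hk
      have hki : k ≠ i := fun h => hk (h ▸ h0)
      have hset : cl0.getD k 0 = cl.getD k 0 := by
        rw [hcl0def, set_getD, if_neg (by rintro ⟨rfl, -⟩; exact hki rfl)]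
      rw [hx2 k (by rw [hset]; exact hk), hset]
    · rw [hx2 i (by rw [h0i]; exact encB_ne_zero _), h0i]

lemma PropClr_dfs (pts : List (List Int)) (low : Int) (cl cl1 : List Int) (i : Nat) (c : Int)
    (hcl0 : cl.getD i 0 = 0) (hval : ValOK cl)
    (hext : ∀ k, k ≠ i → cl.getD k 0 ≠ 0 → cl1.getD k 0 = cl.getD k 0)
    (hch : ∀ k, k < pts.length → cl1.getD k 0 ≠ (cl.set i c).getD k 0 → NbOK pts low cl1 k)
    (hni : NbOK pts low cl1 i) (hP : PropClr pts low cl) : PropClr pts low cl1 := by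
  intro k hk hk0
  by_cases hki : k = i
  · subst hki; exact hni
  · by_cases hchk : cl1.getD k 0 = (cl.set i c).getD k 0
    · have hsetk : (cl.set i c).getD k 0 = cl.getD k 0 := by
        rw [set_getD, if_neg (by rintro ⟨rfl, -⟩; exact hki rfl)]
      rw [hsetk] at hchk
      have hclk : cl.getD k 0 ≠ 0 := by rw [← hchk]; exact hk0
      have hnb : NbOK pts low cl k := hP k hk hclk
      have hv : cl.getD k 0 = 1 ∨ cl.getD k 0 = -1 := by
        rcases hval k with h | h | h
        · right; exact h
        · exact absurd h hclk
        · left; exact h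
      refine NbOK_ext pts low cl cl1 k hnb hv ?_
      intro m hm
      have hmi : m ≠ i := fun h => hm (h ▸ hcl0)
      exact hext m hmi hm
    · exact hch k hk hchk

lemma topA_sound (pts : List (List Int)) (low : Int) :
    ∀ (l : List Nat) (cl cl' : List Int),
      (∀ i ∈ l, i < pts.length) → cl.length = pts.length → ValOK cl → PropClr pts low cl →
      l.foldl (topStepA pts low) (cl, true) = (cl', true) →
      cl'.length = pts.length ∧ ValOK cl' ∧ PropClr pts low cl' ∧
      (∀ k, cl.getD k 0 ≠ 0 → cl'.getD k 0 = cl.getD k 0) ∧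
      (∀ i ∈ l, cl'.getD i 0 ≠ 0) := by
  intro l
  induction l with
  | nil =>
    intro cl cl' _ hlen hv hP hrun
    obtain rfl : cl = cl' := by simpa using hrun
    exact ⟨hlen, hv, hP, fun _ _ => rfl, fun i hi => absurd hi (List.not_mem_nil)⟩
  | cons i l ihl =>
    intro cl cl' hmem hlen hv hP hrun
    have hin : i < pts.length := hmem i List.mem_cons_self
    have hmem' : ∀ x ∈ l, x < pts.length := fun x hx => hmem x (List.mem_cons_of_mem _ hx)
    simp only [List.foldl_cons] at hrun
    by_cases h0 : cl.getD i 0 = 0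
    · rw [show topStepA pts low (cl, true) i = dfsA pts low (pts.length + 1) cl i 1 from by
        simp only [topStepA]; rw [if_neg (by simp), if_pos h0]] at hrun
      rcases hd : dfsA pts low (pts.length + 1) cl i 1 with ⟨cl1, b1⟩
      rw [hd] at hrun
      cases b1 with
      | false =>
        rw [foldl_flag_false _ (fun st a hst => by simp [topStepA, hst]) l _ rfl] at hrun
        simp at hrun
      | true =>
        obtain ⟨b1, b2, b3, b4, b5, b6⟩ :=
          dfsA_sound pts low (pts.length + 1) cl i 1 cl1 hlen hin (Or.inl rfl) hv hd
        have hP1 : PropClr pts low cl1 :=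
          PropClr_dfs pts low cl cl1 i 1 h0 hv b2 b5 b6 hP
        obtain ⟨a1, a2, a3, a4, a5⟩ := ihl cl1 cl' hmem' b1 b4 hP1 hrun
        refine ⟨a1, a2, a3, ?_, ?_⟩
        · intro k hk
          have hki : k ≠ i := fun h => hk (h ▸ h0)
          rw [a4 k (by rw [b2 k hki hk]; exact hk), b2 k hki hk]
        · intro x hx
          rcases List.mem_cons.mp hx with rfl | hx'
          · rw [a4 x (by rw [b3]; omega), b3]; omega
          · exact a5 x hx'
    · rw [show topStepA pts low (cl, true) i = (cl, true) from by
        simp only [topStepA]; rw [if_neg (by simp), if_neg h0]] at hrun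
      obtain ⟨a1, a2, a3, a4, a5⟩ := ihl cl cl' hmem' hlen hv hP hrun
      refine ⟨a1, a2, a3, a4, ?_⟩
      intro x hx
      rcases List.mem_cons.mp hx with rfl | hx'
      · rw [a4 x h0]; exact h0
      · exact a5 x hx'

lemma edgeP_symm (pts : List (List Int)) (low : Int) (i j : Nat)
    (h : edgeP pts low i j) : edgeP pts low j i :=
  ⟨Ne.symm h.1, by rw [manDist_comm]; exact h.2⟩

lemma topA_complete (pts : List (List Int)) (low : Int) (c0 : Nat → Bool)
    (hC : ProperC pts low c0) :
    ∀ (l : List Nat) (cl : List Int),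
      (∀ i ∈ l, i < pts.length) → cl.length = pts.length → ValOK cl → PropClr pts low cl →
      ∃ cl', l.foldl (topStepA pts low) (cl, true) = (cl', true) := by
  intro l
  induction l with
  | nil => intro cl _ _ _ _; exact ⟨cl, rfl⟩
  | cons i l ihl =>
    intro cl hmem hlen hv hP
    have hin : i < pts.length := hmem i List.mem_cons_self
    have hmem' : ∀ x ∈ l, x < pts.length := fun x hx => hmem x (List.mem_cons_of_mem _ hx)
    simp only [List.foldl_cons]
    by_cases h0 : cl.getD i 0 = 0
    · rw [show topStepA pts low (cl, true) i = dfsA pts low (pts.length + 1) cl i 1 from by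
        simp only [topStepA]; rw [if_neg (by simp), if_pos h0]]
      -- a proper colouring that agrees with the partial colours and is true at i
      set c : Nat → Bool :=
        fun k => if cl.getD k 0 = 0 then (c0 k == c0 i) else decide (cl.getD k 0 = 1) with hcdef
      have hci : c i = true := by simp only [hcdef]; rw [if_pos h0]; exact beq_self_eq_true _
      have hCc : ProperC pts low c := by
        intro a b ha hb he
        simp only [hcdef]
        by_cases h0a : cl.getD a 0 = 0 <;> by_cases h0b : cl.getD b 0 = 0
        · simp only [h0a, h0b]
          intro hcontr
          have heqc : c0 a = c0 b := by
            cases hA : c0 a <;> cases hB : c0 b <;> cases hI : c0 i <;>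
              simp_all
          exact hC a b ha hb he heqc
        · exfalso
          have heq := (hP b hb h0b) a ha (edgeP_symm pts low a b he)
          rw [h0a] at heq
          rcases hv b with h | h | h
          · rw [h] at heq; norm_num at heq
          · exact h0b h
          · rw [h] at heq; norm_num at heq
        · exfalso
          have heq := (hP a ha h0a) b hb he
          rw [h0b] at heq
          rcases hv a with h | h | h
          · rw [h] at heq; norm_num at heq
          · exact h0a h
          · rw [h] at heq; norm_num at heq
        · have heq := (hP a ha h0a) b hb he
          have hva : cl.getD a 0 = 1 ∨ cl.getD a 0 = -1 := by
            rcases hv a with h | h | h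
            · right; exact h
            · exact absurd h h0a
            · left; exact h
          rcases hva with h | h
          · rw [h] at heq
            rw [if_neg h0a, if_neg h0b, h, heq]
            decide
          · rw [h] at heq
            rw [neg_neg] at heq
            rw [if_neg h0a, if_neg h0b, h, heq]
            decide
      have hag : ∀ k, cl.getD k 0 ≠ 0 → cl.getD k 0 = encB (c k) := by
        intro k hk
        simp only [hcdef]
        rcases hv k with h | h | h
        · rw [if_neg (by rw [h]; norm_num), h]; decide
        · exact absurd h hk
        · rw [if_neg (by rw [h]; norm_num), h]; decide
      have hcnt : count0 cl ≤ pts.length + 1 := by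
        have := count0_le cl; omega
      obtain ⟨cl1, hd, hb1, hb2, hb3, hb4⟩ :=
        dfsA_complete pts low c hCc (pts.length + 1) cl i hlen hin h0 hag hcnt
      rw [hci] at hd
      have henc1 : encB true = 1 := rfl
      rw [henc1] at hd
      rw [hd]
      obtain ⟨s1, s2, s3, s4, s5, s6⟩ :=
        dfsA_sound pts low (pts.length + 1) cl i 1 cl1 hlen hin (Or.inl rfl) hv hd
      have hP1 : PropClr pts low cl1 :=
        PropClr_dfs pts low cl cl1 i 1 h0 hv s2 s5 s6 hP
      exact ihl cl1 hmem' s1 s4 hP1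
    · rw [show topStepA pts low (cl, true) i = (cl, true) from by
        simp only [topStepA]; rw [if_neg (by simp), if_neg h0]]
      exact ihl cl hmem' hlen hv hP

lemma checkA_iff (pts : List (List Int)) (low : Int) :
    checkA pts low = true ↔ ∃ c, ProperC pts low c := by
  constructor
  · intro h
    unfold checkA at h
    rcases hr : (List.range pts.length).foldl (topStepA pts low)
        (List.replicate pts.length 0, true) with ⟨cl', b⟩
    rw [hr] at h
    simp only at h
    subst h
    have hv0 : ValOK (List.replicate pts.length 0) := by
      intro k; right; left; exact replicate_getD pts.length k
    have hP0 : PropClr pts low (List.replicate pts.length 0) := by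
      intro k _ hk; exact absurd (replicate_getD pts.length k) hk
    obtain ⟨a1, a2, a3, a4, a5⟩ := topA_sound pts low (List.range pts.length)
      (List.replicate pts.length 0) cl' (fun x hx => List.mem_range.mp hx)
      (by simp) hv0 hP0 hr
    refine ⟨fun k => decide (cl'.getD k 0 = 1), ?_⟩
    intro a b ha hb he
    have hnz : cl'.getD a 0 ≠ 0 := a5 a (List.mem_range.mpr ha)
    have heq := (a3 a ha hnz) b hb he
    have hva : cl'.getD a 0 = 1 ∨ cl'.getD a 0 = -1 := by
      rcases a2 a with h | h | h
      · right; exact h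
      · exact absurd h hnz
      · left; exact h
    show decide (cl'.getD a 0 = 1) ≠ decide (cl'.getD b 0 = 1)
    rcases hva with h | h
    · rw [h] at heq; rw [h, heq]; decide
    · rw [h] at heq; rw [neg_neg] at heq; rw [h, heq]; decide
  · rintro ⟨c, hc⟩
    unfold checkA
    have hv0 : ValOK (List.replicate pts.length 0) := by
      intro k; right; left; exact replicate_getD pts.length k
    have hP0 : PropClr pts low (List.replicate pts.length 0) := by
      intro k _ hk; exact absurd (replicate_getD pts.length k) hk
    obtain ⟨cl', hrun⟩ := topA_complete pts low c hc (List.range pts.length)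
      (List.replicate pts.length 0) (fun x hx => List.mem_range.mp hx) (by simp) hv0 hP0
    rw [hrun]

lemma foldB_sound (pts : List (List Int)) (low : Int) :
    ∀ (es : List (Int × Nat × Nat)) (comp : List Nat) (par : List Bool)
      (comp' : List Nat) (par' : List Bool),
      (∀ e ∈ es, e.2.1 < pts.length ∧ e.2.2 < pts.length) →
      comp.length = pts.length → par.length = pts.length →
      es.foldl (stepB low) ((comp, par), true) = ((comp', par'), true) →
      comp'.length = pts.length ∧ par'.length = pts.length ∧
      (∀ a b, a < pts.length → b < pts.length → comp.getD a 0 = comp.getD b 0 →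
        par.getD a false ≠ par.getD b false →
        comp'.getD a 0 = comp'.getD b 0 ∧ par'.getD a false ≠ par'.getD b false) ∧
      (∀ e ∈ es, e.1 < low →
        comp'.getD e.2.1 0 = comp'.getD e.2.2 0 ∧
        par'.getD e.2.1 false ≠ par'.getD e.2.2 false) := by
  intro es
  induction es with
  | nil =>
    intro comp par comp' par' _ hlc hlp hrun
    obtain ⟨rfl, rfl⟩ : comp = comp' ∧ par = par' := by simpa using hrun
    exact ⟨hlc, hlp, fun a b _ _ h hp => ⟨h, hp⟩, fun e he => absurd he (List.not_mem_nil)⟩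
  | cons e es ihes =>
    intro comp par comp' par' hbnd hlc hlp hrun
    obtain ⟨d, i, j⟩ := e
    have hbi : i < pts.length := (hbnd (d, i, j) List.mem_cons_self).1
    have hbj : j < pts.length := (hbnd (d, i, j) List.mem_cons_self).2
    have hbnd' : ∀ e ∈ es, e.2.1 < pts.length ∧ e.2.2 < pts.length :=
      fun e he => hbnd e (List.mem_cons_of_mem _ he)
    simp only [List.foldl_cons] at hrun
    by_cases hd : low ≤ d
    · rw [show stepB low ((comp, par), true) (d, i, j) = ((comp, par), true) from by
        simp only [stepB]; rw [if_neg (by simp), if_pos hd]] at hrun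
      obtain ⟨a1, a2, a3, a4⟩ := ihes comp par comp' par' hbnd' hlc hlp hrun
      refine ⟨a1, a2, a3, ?_⟩
      intro e he hlow
      rcases List.mem_cons.mp he with rfl | he'
      · exact absurd hlow (not_lt.mpr hd)
      · exact a4 e he' hlow
    · by_cases hcc : comp.getD i 0 = comp.getD j 0
      · by_cases hpp : par.getD i false = par.getD j false
        · rw [show stepB low ((comp, par), true) (d, i, j) = ((comp, par), false) from by
            simp only [stepB]; rw [if_neg (by simp), if_neg hd, if_pos hcc, if_pos hpp]] at hrun
          rw [foldl_flag_false _ (fun st a hst => by simp [stepB, hst]) es _ rfl] at hrun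
          simp at hrun
        · rw [show stepB low ((comp, par), true) (d, i, j) = ((comp, par), true) from by
            simp only [stepB]; rw [if_neg (by simp), if_neg hd, if_pos hcc, if_neg hpp]] at hrun
          obtain ⟨a1, a2, a3, a4⟩ := ihes comp par comp' par' hbnd' hlc hlp hrun
          refine ⟨a1, a2, a3, ?_⟩
          intro e he hlow
          rcases List.mem_cons.mp he with rfl | he'
          · exact a3 i j hbi hbj hcc hpp
          · exact a4 e he' hlow
      · -- merge step
        rw [show stepB low ((comp, par), true) (d, i, j) =
            ((comp.map fun x => if x = comp.getD j 0 then comp.getD i 0 else x,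
              (comp.zip par).map fun cp =>
                if cp.1 = comp.getD j 0 ∧ (par.getD i false == par.getD j false) = true
                then !cp.2 else cp.2), true) from by
          simp only [stepB]; rw [if_neg (by simp), if_neg hd, if_neg hcc]] at hrun
        set mcomp := comp.map fun x => if x = comp.getD j 0 then comp.getD i 0 else x with hmc
        set mpar := (comp.zip par).map fun cp =>
            if cp.1 = comp.getD j 0 ∧ (par.getD i false == par.getD j false) = true
            then !cp.2 else cp.2 with hmp
        have hlc1 : mcomp.length = pts.length := by rw [hmc, List.length_map]; exact hlc
        have hlp1 : mpar.length = pts.length := by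
          rw [hmp, List.length_map, List.length_zip, hlc, hlp]; omega
        have hgc : ∀ k, k < pts.length → mcomp.getD k 0 =
            if comp.getD k 0 = comp.getD j 0 then comp.getD i 0 else comp.getD k 0 := by
          intro k hk; rw [hmc]; exact getD_merge_comp comp _ _ k (by omega)
        have hgp : ∀ k, k < pts.length → mpar.getD k false =
            if comp.getD k 0 = comp.getD j 0 ∧ (par.getD i false == par.getD j false) = true
            then !(par.getD k false) else par.getD k false := by
          intro k hk; rw [hmp]; exact getD_merge_par comp par _ _ k (by omega) (by omega)
        obtain ⟨a1, a2, a3, a4⟩ := ihes mcomp mpar comp' par' hbnd' hlc1 hlp1 hrun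
        have hpres : ∀ a b, a < pts.length → b < pts.length →
            comp.getD a 0 = comp.getD b 0 → par.getD a false ≠ par.getD b false →
            mcomp.getD a 0 = mcomp.getD b 0 ∧ mpar.getD a false ≠ mpar.getD b false := by
          intro a b ha hb hcab hpab
          rw [hgc a ha, hgc b hb, hgp a ha, hgp b hb, hcab]
          constructor
          · rfl
          · by_cases hcb : comp.getD b 0 = comp.getD j 0 <;>
              by_cases hf : (par.getD i false == par.getD j false) = true
            · rw [if_pos ⟨hcb, hf⟩, if_pos ⟨hcb, hf⟩]
              exact fun hcon => hpab ((bool_not_iff _ _).mp hcon)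
            · rw [if_neg (by rintro ⟨-, h⟩; exact hf h), if_neg (by rintro ⟨-, h⟩; exact hf h)]
              exact hpab
            · rw [if_neg (by rintro ⟨h, -⟩; exact hcb h), if_neg (by rintro ⟨h, -⟩; exact hcb h)]
              exact hpab
            · rw [if_neg (by rintro ⟨h, -⟩; exact hcb h), if_neg (by rintro ⟨-, h⟩; exact hf h)]
              exact hpab
        refine ⟨a1, a2, fun a b ha hb hcab hpab => a3 a b ha hb
          (hpres a b ha hb hcab hpab).1 (hpres a b ha hb hcab hpab).2, ?_⟩
        intro e he hlow
        rcases List.mem_cons.mp he with rfl | he'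
        · -- the merged pair now satisfies the invariant; push it through
          have hmi : mcomp.getD i 0 = comp.getD i 0 := by
            rw [hgc i hbi, if_neg hcc]
          have hmj : mcomp.getD j 0 = comp.getD i 0 := by
            rw [hgc j hbj, if_pos rfl]
          have hpi : mpar.getD i false = par.getD i false := by
            rw [hgp i hbi, if_neg (by rintro ⟨h, -⟩; exact hcc h)]
          have hpj : mpar.getD i false ≠ mpar.getD j false := by
            rw [hpi, hgp j hbj]
            by_cases hf : par.getD i false = par.getD j false
            · rw [if_pos ⟨rfl, by rw [hf]; exact beq_self_eq_true _⟩]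
              intro hcon
              rw [hf] at hcon
              exact (Bool.not_ne_self _) hcon.symm
            · rw [if_neg (by rintro ⟨-, h⟩; exact hf (by simpa using h))]
              exact hf
          exact a3 i j hbi hbj (by rw [hmi, hmj]) hpj
        · exact a4 e he' hlow

lemma foldB_complete (pts : List (List Int)) (low : Int) (c : Nat → Bool)
    (hC : ProperC pts low c) :
    ∀ (es : List (Int × Nat × Nat)) (comp : List Nat) (par : List Bool),
      (∀ e ∈ es, ∃ i j, e = (manDist (pts.getD i []) (pts.getD j []), i, j) ∧
        i < j ∧ j < pts.length) →
      comp.length = pts.length → par.length = pts.length → GoodB pts c comp par →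
      ∃ comp' par', es.foldl (stepB low) ((comp, par), true) = ((comp', par'), true) := by
  intro es
  induction es with
  | nil => intro comp par _ _ _ _; exact ⟨comp, par, rfl⟩
  | cons e es ihes =>
    intro comp par hsh hlc hlp hG
    obtain ⟨i, j, heq, hij, hjn⟩ := hsh e List.mem_cons_self
    subst heq
    have hin : i < pts.length := by omega
    have hsh' : ∀ e ∈ es, ∃ i j, e = (manDist (pts.getD i []) (pts.getD j []), i, j) ∧
        i < j ∧ j < pts.length := fun e he => hsh e (List.mem_cons_of_mem _ he)
    simp only [List.foldl_cons]
    by_cases hd : low ≤ manDist (pts.getD i []) (pts.getD j [])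
    · rw [show stepB low ((comp, par), true) (manDist (pts.getD i []) (pts.getD j []), i, j)
          = ((comp, par), true) from by
        simp only [stepB]; rw [if_neg (by simp), if_pos hd]]
      exact ihes comp par hsh' hlc hlp hG
    · have hedge : edgeP pts low i j := ⟨by omega, not_le.mp hd⟩
      have hcij : c i ≠ c j := hC i j hin hjn hedge
      by_cases hcc : comp.getD i 0 = comp.getD j 0
      · have hpp : par.getD i false ≠ par.getD j false := by
          intro h
          exact hcij ((hG i j hin hjn hcc).mp h)
        rw [show stepB low ((comp, par), true) (manDist (pts.getD i []) (pts.getD j []), i, j)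
            = ((comp, par), true) from by
          simp only [stepB]; rw [if_neg (by simp), if_neg hd, if_pos hcc, if_neg hpp]]
        exact ihes comp par hsh' hlc hlp hG
      · rw [show stepB low ((comp, par), true) (manDist (pts.getD i []) (pts.getD j []), i, j) =
            ((comp.map fun x => if x = comp.getD j 0 then comp.getD i 0 else x,
              (comp.zip par).map fun cp =>
                if cp.1 = comp.getD j 0 ∧ (par.getD i false == par.getD j false) = true
                then !cp.2 else cp.2), true) from by
          simp only [stepB]; rw [if_neg (by simp), if_neg hd, if_neg hcc]]
        set mcomp := comp.map fun x => if x = comp.getD j 0 then comp.getD i 0 else x with hmc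
        set mpar := (comp.zip par).map fun cp =>
            if cp.1 = comp.getD j 0 ∧ (par.getD i false == par.getD j false) = true
            then !cp.2 else cp.2 with hmp
        have hlc1 : mcomp.length = pts.length := by rw [hmc, List.length_map]; exact hlc
        have hlp1 : mpar.length = pts.length := by
          rw [hmp, List.length_map, List.length_zip, hlc, hlp]; omega
        have hgc : ∀ k, k < pts.length → mcomp.getD k 0 =
            if comp.getD k 0 = comp.getD j 0 then comp.getD i 0 else comp.getD k 0 := by
          intro k hk; rw [hmc]; exact getD_merge_comp comp _ _ k (by omega)
        have hgp : ∀ k, k < pts.length → mpar.getD k false =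
            if comp.getD k 0 = comp.getD j 0 ∧ (par.getD i false == par.getD j false) = true
            then !(par.getD k false) else par.getD k false := by
          intro k hk; rw [hmp]; exact getD_merge_par comp par _ _ k (by omega) (by omega)
        have hG1 : GoodB pts c mcomp mpar := by
          intro a b ha hb hcab
          rw [hgc a ha, hgc b hb] at hcab
          rw [hgp a ha, hgp b hb]
          by_cases hca : comp.getD a 0 = comp.getD j 0 <;>
            by_cases hcb : comp.getD b 0 = comp.getD j 0
          · -- both relabeled: same component before
            have hab : comp.getD a 0 = comp.getD b 0 := by rw [hca, hcb]
            have hGab := hG a b ha hb hab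
            by_cases hf : (par.getD i false == par.getD j false) = true
            · rw [if_pos ⟨hca, hf⟩, if_pos ⟨hcb, hf⟩]
              rw [← hGab]
              exact bool_not_iff _ _
            · rw [if_neg (by rintro ⟨-, h⟩; exact hf h), if_neg (by rintro ⟨-, h⟩; exact hf h)]
              exact hGab
          · -- a relabeled, b not: comp b = comp i
            rw [if_pos hca, if_neg hcb] at hcab
            have h1 := hG a j ha hjn hca
            have h2 := hG b i hb hin hcab.symm
            by_cases hf : (par.getD i false == par.getD j false) = true
            · rw [if_pos ⟨hca, hf⟩,
                if_neg (show ¬(comp.getD b 0 = comp.getD j 0 ∧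
                  (par.getD i false == par.getD j false) = true) from fun hx => hcb hx.1)]
              exact boolMagicT (par.getD a false) (par.getD b false) (par.getD i false)
                (par.getD j false) (c a) (c b) (c i) (c j) h1 h2 hcij hf
            · rw [if_neg (show ¬(comp.getD a 0 = comp.getD j 0 ∧
                  (par.getD i false == par.getD j false) = true) from fun hx => hf hx.2),
                if_neg (show ¬(comp.getD b 0 = comp.getD j 0 ∧
                  (par.getD i false == par.getD j false) = true) from fun hx => hcb hx.1)]
              exact boolMagicF (par.getD a false) (par.getD b false) (par.getD i false)
                (par.getD j false) (c a) (c b) (c i) (c j) h1 h2 hcij hf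
          · -- b relabeled, a not: comp a = comp i
            rw [if_neg hca, if_pos hcb] at hcab
            have h1 := hG b j hb hjn hcb
            have h2 := hG a i ha hin hcab
            by_cases hf : (par.getD i false == par.getD j false) = true
            · rw [if_neg (show ¬(comp.getD a 0 = comp.getD j 0 ∧
                  (par.getD i false == par.getD j false) = true) from fun hx => hca hx.1),
                if_pos ⟨hcb, hf⟩]
              exact boolMagic2T (par.getD a false) (par.getD b false) (par.getD i false)
                (par.getD j false) (c a) (c b) (c i) (c j) h1 h2 hcij hf
            · rw [if_neg (show ¬(comp.getD a 0 = comp.getD j 0 ∧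
                  (par.getD i false == par.getD j false) = true) from fun hx => hca hx.1),
                if_neg (show ¬(comp.getD b 0 = comp.getD j 0 ∧
                  (par.getD i false == par.getD j false) = true) from fun hx => hf hx.2)]
              exact boolMagic2F (par.getD a false) (par.getD b false) (par.getD i false)
                (par.getD j false) (c a) (c b) (c i) (c j) h1 h2 hcij hf
          · rw [if_neg hca, if_neg hcb] at hcab
            rw [if_neg (by rintro ⟨h, -⟩; exact hca h), if_neg (by rintro ⟨h, -⟩; exact hcb h)]
            exact hG a b ha hb hcab
        exact ihes mcomp mpar hsh' hlc1 hlp1 hG1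

lemma checkB_iff (pts : List (List Int)) (low : Int) :
    checkB pts.length (pairsB pts) low = true ↔ ∃ c, ProperC pts low c := by
  constructor
  · intro h
    unfold checkB at h
    rcases hr : (pairsB pts).foldl (stepB low)
        ((List.range pts.length, List.replicate pts.length false), true) with ⟨⟨comp', par'⟩, b⟩
    rw [hr] at h
    simp only at h
    subst h
    have hbnd : ∀ e ∈ pairsB pts, e.2.1 < pts.length ∧ e.2.2 < pts.length := by
      intro e he
      obtain ⟨i, j, rfl, hij, hjn⟩ := (mem_pairsB pts e).mp he
      constructor
      · show i < pts.length; omega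
      · show j < pts.length; omega
    obtain ⟨a1, a2, a3, a4⟩ := foldB_sound pts low (pairsB pts) (List.range pts.length)
      (List.replicate pts.length false) comp' par' hbnd (by simp) (by simp) hr
    refine ⟨fun k => par'.getD k false, ?_⟩
    intro a b ha hb he
    rcases Nat.lt_or_ge a b with hab | hab
    · have hmem : (manDist (pts.getD a []) (pts.getD b []), a, b) ∈ pairsB pts :=
        (mem_pairsB pts _).mpr ⟨a, b, rfl, hab, hb⟩
      exact (a4 _ hmem he.2).2
    · have hba : b < a := by
        rcases Nat.lt_or_ge b a with h | h
        · exact h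
        · exact absurd (Nat.le_antisymm h hab) he.1
      have hmem : (manDist (pts.getD b []) (pts.getD a []), b, a) ∈ pairsB pts :=
        (mem_pairsB pts _).mpr ⟨b, a, rfl, hba, ha⟩
      have hd : manDist (pts.getD b []) (pts.getD a []) < low := by
        rw [manDist_comm]; exact he.2
      exact Ne.symm (a4 _ hmem hd).2
  · rintro ⟨c, hc⟩
    unfold checkB
    have hG : GoodB pts c (List.range pts.length) (List.replicate pts.length false) := by
      intro a b ha hb hcab
      rw [range_getD _ _ ha, range_getD _ _ hb] at hcab
      subst hcab
      exact ⟨fun _ => rfl, fun _ => rfl⟩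
    have hsh : ∀ e ∈ pairsB pts, ∃ i j,
        e = (manDist (pts.getD i []) (pts.getD j []), i, j) ∧ i < j ∧ j < pts.length :=
      fun e he => (mem_pairsB pts e).mp he
    obtain ⟨comp', par', hrun⟩ := foldB_complete pts low c hc (pairsB pts)
      (List.range pts.length) (List.replicate pts.length false) hsh (by simp) (by simp) hG
    rw [hrun]

lemma check_eq (pts : List (List Int)) (low : Int) :
    checkA pts low = checkB pts.length (pairsB pts) low := by
  have h1 := checkA_iff pts low
  have h2 := checkB_iff pts low
  cases hA : checkA pts low <;> cases hB : checkB pts.length (pairsB pts) low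
  · rfl
  · rw [hA] at h1; rw [hB] at h2
    exact absurd (h1.mpr (h2.mp rfl)) (by simp)
  · rw [hA] at h1; rw [hB] at h2
    exact absurd (h2.mpr (h1.mp rfl)) (by simp)
  · rfl

lemma bs_eq (c1 c2 : Int → Bool) (h : ∀ m, c1 m = c2 m) :
    ∀ (fuel : Nat) (l r : Int), bsA c1 fuel l r = bsB c2 fuel l r := by
  intro fuel
  induction fuel with
  | zero => intro l r; rfl
  | succ fuel ih =>
    intro l r
    simp only [bsA, bsB, h]
    split_ifs <;> first | apply ih | rfl

-- ===== VERDICT (by name: the statement is the Claim_ definition above) =====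
theorem maxPartitionFactor_spec : Claim_equal_maxPartitionFactor := by
  intro points _ _
  unfold Spec_maxPartitionFactor maxPartitionFactor maxPartitionFactor_alt
  by_cases h2 : points.length = 2
  · rw [if_pos h2, if_pos h2]
  · rw [if_neg h2, if_neg h2]
    show bsA (checkA points) _ 0 _ = bsB (checkB points.length (pairsB points)) _ 0 _
    rw [dists_eq]
    exact bs_eq _ _ (fun m => check_eq points m) _ _ _
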